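-- pv_equiv track=rewrite | github.com/DaniloRibeiro07/UFS | PI/Questionário 12/Soma de fatoriais.py | soma_dos_multiplode3
-- ===== SOURCE A (Python) =====
-- def fatorial(numero):
--     if numero<=1:
--         return(1)
--     else:
--         return(numero*fatorial(numero-1))
--
-- def soma_dos_multiplode3(array):
--     if len(array)==1:
--         if array[0]%3==0:
--             return fatorial(int(array[0]))
--         else:
--             return 0
--     else:
--         if array[0]%3==0:
--             return (fatorial(int(array[0]))+soma_dos_multiplode3(array[1:]))
--         else:
--             return 0+soma_dos_multiplode3(array[1:])
-- ===== SOURCE B (Python) =====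
-- def fatorial(numero):
--     resultado = 1
--     for i in range(2, numero + 1):
--         resultado *= i
--     return resultado
--
-- def soma_dos_multiplode3(array):
--     total = fatorial(int(array[0])) if array[0] % 3 == 0 else 0
--     for x in array[1:]:
--         if x % 3 == 0:
--             total += fatorial(int(x))
--     return total
-- ===== Notes on version B (the rewrite author's own statement) =====
-- stated objective: simpler
-- what changed: Replaced the slice-based recursion (and recursive factorial) by a single iterative pass with an accumulator and an iterative product for the factorial.
-- outside the precondition, e.g. on soma_dos_multiplode3([]): A raises IndexError, B raises IndexError
import Mathlib
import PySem

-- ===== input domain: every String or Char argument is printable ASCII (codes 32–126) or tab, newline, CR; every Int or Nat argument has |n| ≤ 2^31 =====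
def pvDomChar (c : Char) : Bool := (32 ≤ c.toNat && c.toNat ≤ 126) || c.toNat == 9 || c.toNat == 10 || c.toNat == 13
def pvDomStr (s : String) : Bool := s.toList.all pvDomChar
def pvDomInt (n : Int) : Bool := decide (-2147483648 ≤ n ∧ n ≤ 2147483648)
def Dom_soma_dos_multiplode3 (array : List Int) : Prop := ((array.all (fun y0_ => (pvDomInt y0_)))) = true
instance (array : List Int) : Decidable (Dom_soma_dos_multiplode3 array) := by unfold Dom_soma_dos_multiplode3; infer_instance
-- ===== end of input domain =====

-- B replaces A's slice-based recursion (and recursive factorial) by one iterative pass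
-- with an accumulator and an iterative product: simpler, no recursion depth, no slice copies.


-- ===== PORT A =====
-- recursive factorial, as in A (numero<=1 → 1)
def fatorialA (numero : Int) : Int :=
  if numero ≤ 1 then 1 else numero * fatorialA (numero - 1)
termination_by numero.toNat
decreasing_by omega

-- A's recursion: len==1 base case, otherwise head + recursion on array[1:].
-- On [] Python A raises IndexError (excluded by Pre_); the port returns 0 there.
def soma_dos_multiplode3 : List Int → Int
  | [] => 0
  | [x] => if PySem.Int.mod x 3 == 0 then fatorialA x else 0
  | x :: y :: rest =>
      if PySem.Int.mod x 3 == 0 then fatorialA x + soma_dos_multiplode3 (y :: rest)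
      else 0 + soma_dos_multiplode3 (y :: rest)

-- ===== PORT B =====
-- iterative factorial: product over range(2, numero+1)
def fatorialB (numero : Int) : Int :=
  (PySem.List.pyRange 2 (numero + 1) 1).foldl (fun resultado i => resultado * i) 1

-- total initialised from array[0] (Python B raises IndexError on [], excluded by Pre_;
-- the port returns 0 there), then one fold over array[1:].
def soma_dos_multiplode3_alt (array : List Int) : Int :=
  match array with
  | [] => 0
  | x :: rest =>
      let total : Int := if PySem.Int.mod x 3 == 0 then fatorialB x else 0
      rest.foldl (fun acc y => if PySem.Int.mod y 3 == 0 then acc + fatorialB y else acc) total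

-- ===== PRECONDITION & SPEC =====
-- Pre_ excludes the empty list, on which both Pythons raise IndexError, and very long lists
-- or lists holding a very large multiple of 3, on which A's recursion (soma / fatorial)
-- exceeds Python's recursion limit (RecursionError); the bounds are conservative (the exact
-- raise point depends on the interpreter's stack state and configured limit), so they also
-- exclude some deep inputs A returns on.
def Pre_soma_dos_multiplode3 (array : List Int) : Prop :=
  array ≠ [] ∧ array.length ≤ 4500 ∧ ∀ x ∈ array, PySem.Int.mod x 3 = 0 → x ≤ 4500
instance (array : List Int) : Decidable (Pre_soma_dos_multiplode3 array) := by unfold Pre_soma_dos_multiplode3; infer_instance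
def pvWitness_soma_dos_multiplode3 : List Int := ([3, 4, 6])

def Spec_soma_dos_multiplode3 (array : List Int) (out : Int) : Prop := out = soma_dos_multiplode3_alt array
instance (array : List Int) (out : Int) : Decidable (Spec_soma_dos_multiplode3 array out) := by unfold Spec_soma_dos_multiplode3; infer_instance

-- ===== CLAIM (what is proved, stated in full; the proofs are below) =====
def Claim_equal_soma_dos_multiplode3 : Prop := ∀ (array : List Int), Dom_soma_dos_multiplode3 array → Pre_soma_dos_multiplode3 array → Spec_soma_dos_multiplode3 array (soma_dos_multiplode3 array)

-- ===== LEMMAS AND PROOFS =====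

theorem fat_eq (n : Int) : fatorialA n = fatorialB n := by
  rw [fatorialA]
  split_ifs with h
  · unfold fatorialB
    rw [PySem.List.pyRange_one_eq_nil (by omega)]
    rfl
  · have ih := fat_eq (n - 1)
    unfold fatorialB at ih ⊢
    rw [PySem.List.pyRange_one_succ_right (by omega : (2:Int) ≤ n), List.foldl_append]
    have hn : n - 1 + 1 = n := by omega
    rw [hn] at ih
    simp only [List.foldl]
    rw [← ih, mul_comm]
termination_by n.toNat
decreasing_by omega

theorem foldl_shift (l : List Int) (t s : Int) :
    l.foldl (fun acc y => if PySem.Int.mod y 3 == 0 then acc + fatorialB y else acc) (t + s)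
      = t + l.foldl (fun acc y => if PySem.Int.mod y 3 == 0 then acc + fatorialB y else acc) s := by
  induction l generalizing s with
  | nil => rfl
  | cons y l ih =>
      simp only [List.foldl]
      split_ifs with h
      · rw [add_assoc, ih]
      · exact ih s

theorem soma_cons (x : Int) (rest : List Int) :
    soma_dos_multiplode3 (x :: rest)
      = (if PySem.Int.mod x 3 == 0 then fatorialB x else 0)
        + rest.foldl (fun acc y => if PySem.Int.mod y 3 == 0 then acc + fatorialB y else acc) 0 := by
  induction rest generalizing x with
  | nil => simp [soma_dos_multiplode3, fat_eq]
  | cons y rs ih =>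
      show (if PySem.Int.mod x 3 == 0 then fatorialA x + soma_dos_multiplode3 (y :: rs)
            else 0 + soma_dos_multiplode3 (y :: rs)) = _
      rw [ih y]
      have hstep : (y :: rs).foldl
          (fun acc y => if PySem.Int.mod y 3 == 0 then acc + fatorialB y else acc) 0
          = (if PySem.Int.mod y 3 == 0 then fatorialB y else 0)
            + rs.foldl (fun acc y => if PySem.Int.mod y 3 == 0 then acc + fatorialB y else acc) 0 := by
        simp only [List.foldl]
        split_ifs with h
        · rw [show (0:Int) + fatorialB y = fatorialB y + 0 by ring, foldl_shift]
        · simp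
      rw [hstep, fat_eq]
      split_ifs <;> ring

-- ===== VERDICT (by name: the statement is the Claim_ definition above) =====
theorem soma_dos_multiplode3_spec : Claim_equal_soma_dos_multiplode3 := by
  intro array _ hpre
  unfold Spec_soma_dos_multiplode3
  cases array with
  | nil => exact absurd rfl hpre.1
  | cons x rest =>
      rw [soma_cons]
      show _ = rest.foldl _ (if PySem.Int.mod x 3 == 0 then fatorialB x else 0)
      rw [show (if PySem.Int.mod x 3 == 0 then fatorialB x else 0)
            = (if PySem.Int.mod x 3 == 0 then fatorialB x else 0) + 0 by ring, foldl_shift]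
      ring
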